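-- pv_equiv track=rewrite | github.com/kumtaek/ktohRep | phase1/parsers/parser_factory.py | _is_mybatis_file
-- ===== SOURCE A (Python) =====
-- def _is_mybatis_file(content: str) -> bool:
--     """
--     XML 파일이 MyBatis 파일인지 판별
--
--     Args:
--         content: XML 파일 내용
--
--     Returns:
--         MyBatis 파일 여부
--     """
--     mybatis_indicators = [
--         'mybatis', 'mapper', 'namespace',
--         '<select', '<insert', '<update', '<delete',
--         '#{', '${', '<if', '<foreach', '<choose'
--     ]
--
--     content_lower = content.lower()
--     return any(indicator in content_lower for indicator in mybatis_indicators)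
-- ===== SOURCE B (Python) =====
-- _INDICATORS = [
--     'mybatis', 'mapper', 'namespace',
--     '<select', '<insert', '<update', '<delete',
--     '#{', '${', '<if', '<foreach', '<choose'
-- ]
--
--
-- def _is_mybatis_file(content: str) -> bool:
--     # Single left-to-right scan: at each position try to match an indicator
--     # in place, comparing characters case-insensitively (no lowered copy).
--     n = len(content)
--     for i in range(n + 1):
--         for ind in _INDICATORS:
--             k = len(ind)
--             if i + k <= n and all(content[i + j].lower() == ind[j] for j in range(k)):
--                 return True
--     return False
-- ===== Notes on version B (the rewrite author's own statement) =====
-- stated objective: alternative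
-- what changed: A lowercases the whole string and runs twelve separate substring-membership searches; B makes a single left-to-right positional scan, at each index trying to match an indicator in place with per-character case-insensitive comparison (no lowered copy).
import Mathlib
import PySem

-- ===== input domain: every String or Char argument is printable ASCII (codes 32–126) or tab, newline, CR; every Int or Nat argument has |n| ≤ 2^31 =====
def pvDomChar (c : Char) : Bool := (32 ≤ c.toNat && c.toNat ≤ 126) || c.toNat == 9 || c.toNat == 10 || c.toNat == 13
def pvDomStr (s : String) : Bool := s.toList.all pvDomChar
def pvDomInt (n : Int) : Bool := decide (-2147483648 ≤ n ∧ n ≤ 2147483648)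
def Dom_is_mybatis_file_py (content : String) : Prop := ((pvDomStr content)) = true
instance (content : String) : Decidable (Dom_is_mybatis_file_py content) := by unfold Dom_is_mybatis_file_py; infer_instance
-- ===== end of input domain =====

-- B replaces A's twelve substring searches over a lowered copy with one in-place
-- left-to-right positional scan matching indicators case-insensitively (objective: alternative).

-- ===== PORT A =====
def pvIndicatorsA : List String :=
  ["mybatis", "mapper", "namespace",
   "<select", "<insert", "<update", "<delete",
   "#{", "${", "<if", "<foreach", "<choose"]

def is_mybatis_file_py (content : String) : Bool :=
  let content_lower := PySem.Str.lower content
  pvIndicatorsA.any (fun indicator => PySem.Str.isIn indicator content_lower)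

-- ===== PORT B =====
def pvIndicatorsB : List (List Char) :=
  ["mybatis".toList, "mapper".toList, "namespace".toList,
   "<select".toList, "<insert".toList, "<update".toList, "<delete".toList,
   "#{".toList, "${".toList, "<if".toList, "<foreach".toList, "<choose".toList]

-- 'all(content[i+j].lower() == ind[j] for j in range(k))' with the 'i + k <= n' bound
def pvMatchIC : List Char → List Char → Bool
  | [], _ => true
  | _ :: _, [] => false
  | p :: ps, c :: cs => (PySem.Chars.lowerChar c == p) && pvMatchIC ps cs

-- 'for i in range(n + 1): for ind in _INDICATORS: …'
def pvScan : List Char → Bool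
  | [] => pvIndicatorsB.any (fun p => pvMatchIC p [])
  | c :: rest => pvIndicatorsB.any (fun p => pvMatchIC p (c :: rest)) || pvScan rest

def is_mybatis_file_py_alt (content : String) : Bool := pvScan content.toList

-- ===== PRECONDITION & SPEC =====
def Spec_is_mybatis_file_py (content : String) (out : Bool) : Prop := out = is_mybatis_file_py_alt content
instance (content : String) (out : Bool) : Decidable (Spec_is_mybatis_file_py content out) := by unfold Spec_is_mybatis_file_py; infer_instance

-- ===== CLAIM (what is proved, stated in full; the proofs are below) =====
def Claim_equal_is_mybatis_file_py : Prop := ∀ (content : String), Dom_is_mybatis_file_py content → Spec_is_mybatis_file_py content (is_mybatis_file_py content)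

-- ===== LEMMAS AND PROOFS =====

theorem pvMatchIC_iff (p cs : List Char) :
    pvMatchIC p cs = true ↔ p <+: cs.map PySem.Chars.lowerChar := by
  induction p generalizing cs with
  | nil => simp [pvMatchIC]
  | cons x xs ih =>
    cases cs with
    | nil => simp [pvMatchIC]
    | cons c rest =>
      simp only [pvMatchIC, Bool.and_eq_true, beq_iff_eq, ih, List.map_cons,
        List.cons_prefix_cons]
      constructor
      · rintro ⟨h1, h2⟩; exact ⟨h1.symm, h2⟩
      · rintro ⟨h1, h2⟩; exact ⟨h1.symm, h2⟩

theorem pvScan_iff (cs : List Char) :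
    pvScan cs = true ↔ ∃ p ∈ pvIndicatorsB, p <:+: cs.map PySem.Chars.lowerChar := by
  induction cs with
  | nil =>
    simp [pvScan, List.any_eq_true, pvMatchIC_iff]
  | cons c rest ih =>
    simp only [pvScan, Bool.or_eq_true, List.any_eq_true, pvMatchIC_iff, ih, List.map_cons,
      List.infix_cons_iff]
    constructor
    · rintro (⟨p, hp, h⟩ | ⟨p, hp, h⟩)
      · exact ⟨p, hp, Or.inl h⟩
      · exact ⟨p, hp, Or.inr h⟩
    · rintro ⟨p, hp, h | h⟩
      · exact Or.inl ⟨p, hp, h⟩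
      · exact Or.inr ⟨p, hp, h⟩

theorem pvLower_eq_map (cs : List Char) :
    PySem.Chars.lower cs = cs.map PySem.Chars.lowerChar := rfl

-- ===== VERDICT (by name: the statement is the Claim_ definition above) =====
theorem is_mybatis_file_py_spec : Claim_equal_is_mybatis_file_py := by
  intro content _
  show is_mybatis_file_py content = is_mybatis_file_py_alt content
  rw [Bool.eq_iff_iff]
  unfold is_mybatis_file_py is_mybatis_file_py_alt
  rw [pvScan_iff]
  simp only [List.any_eq_true, PySem.Str.isIn_eq, PySem.Str.toList_lower, pvLower_eq_map,
    PySem.Chars.isIn_iff_infix]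
  have hB : pvIndicatorsB = pvIndicatorsA.map String.toList := rfl
  rw [hB]
  simp only [List.mem_map]
  constructor
  · rintro ⟨ind, hind, h⟩
    exact ⟨ind.toList, ⟨ind, hind, rfl⟩, h⟩
  · rintro ⟨p, ⟨ind, hind, rfl⟩, h⟩
    exact ⟨ind, hind, h⟩
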